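-- pv_equiv track=rewrite | github.com/mattgonzalesced/CED_Extensions | AE pyTools.extension/AE pyTools.Tab/Refrigeration.panel/Ref Ops.pulldown/Place all Coils.pushbutton/script.py | _expand_models
-- ===== SOURCE A (Python) =====
-- def _expand_models(models, count):
--     if count <= 0:
--         return []
--     if not models:
--         return [None] * count
--     if count <= len(models):
--         return models[:count]
--     expanded = []
--     idx = 0
--     while len(expanded) < count:
--         expanded.append(models[idx % len(models)])
--         idx += 1
--     return expanded
-- ===== SOURCE B (Python) =====
-- def _expand_models(models, count):
--     if count <= 0:
--         return []
--     if not models: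
--         return [None] * count
--     reps = count // len(models) + 1
--     return (models * reps)[:count]
-- ===== Notes on version B (the rewrite author's own statement) =====
-- stated objective: idiomatic
-- what changed: Replaces the element-by-element while loop with modular indexing (and the separate count<=len shortcut) by a closed-form repetition: replicate the list count//len+1 times and slice to count.
import Mathlib
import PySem

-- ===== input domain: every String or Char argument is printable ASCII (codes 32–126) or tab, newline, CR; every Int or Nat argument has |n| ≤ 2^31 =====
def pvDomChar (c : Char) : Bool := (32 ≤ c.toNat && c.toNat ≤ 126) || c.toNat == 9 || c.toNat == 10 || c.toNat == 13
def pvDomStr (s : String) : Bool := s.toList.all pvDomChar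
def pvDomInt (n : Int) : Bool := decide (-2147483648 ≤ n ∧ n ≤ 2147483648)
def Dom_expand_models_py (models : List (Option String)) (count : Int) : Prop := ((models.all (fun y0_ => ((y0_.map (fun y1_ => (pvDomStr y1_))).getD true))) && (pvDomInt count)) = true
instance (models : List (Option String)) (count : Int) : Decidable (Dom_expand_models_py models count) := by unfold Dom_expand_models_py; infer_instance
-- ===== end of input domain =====

-- B replaces A's while loop (append models[idx % len] until count) by list repetition and a slice.

-- ===== PORT A =====
-- the while loop: while len(expanded) < count: expanded.append(models[idx % len(models)]); idx += 1
-- ported with fuel = number of remaining iterations (count - len(expanded)); index always in range, so getD is exact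
def expandLoopA (models : List (Option String)) : Nat → Nat → List (Option String) → List (Option String)
  | 0, _, expanded => expanded
  | n + 1, idx, expanded => expandLoopA models n (idx + 1) (expanded ++ [models.getD (idx % models.length) none])

def expand_models_py (models : List (Option String)) (count : Int) : List (Option String) :=
  if count ≤ 0 then []
  else if models = [] then List.replicate count.toNat none
  else if count ≤ (models.length : Int) then models.take count.toNat
  else expandLoopA models count.toNat 0 []

-- ===== PORT B =====
def expand_models_py_alt (models : List (Option String)) (count : Int) : List (Option String) :=
  if count ≤ 0 then []
  else if models = [] then List.replicate count.toNat none
  else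
    let reps := PySem.Int.floordiv count (models.length : Int) + 1
    ((List.replicate reps.toNat models).flatten).take count.toNat

-- ===== PRECONDITION & SPEC =====
def Spec_expand_models_py (models : List (Option String)) (count : Int) (out : List (Option String)) : Prop := out = expand_models_py_alt models count
instance (models : List (Option String)) (count : Int) (out : List (Option String)) : Decidable (Spec_expand_models_py models count out) := by unfold Spec_expand_models_py; infer_instance

-- ===== CLAIM (what is proved, stated in full; the proofs are below) =====
def Claim_equal_expand_models_py : Prop := ∀ (models : List (Option String)) (count : Int), Dom_expand_models_py models count → Spec_expand_models_py models count (expand_models_py models count)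

-- ===== LEMMAS AND PROOFS =====

theorem expandLoopA_eq (models : List (Option String)) :
    ∀ (n idx : Nat) (acc : List (Option String)),
      expandLoopA models n idx acc
        = acc ++ (List.range n).map (fun i => models.getD ((idx + i) % models.length) none) := by
  intro n
  induction n with
  | zero => intro idx acc; simp [expandLoopA]
  | succ k ih =>
    intro idx acc
    rw [expandLoopA, ih, List.range_succ_eq_map]
    simp only [List.map_cons, List.map_map, List.append_assoc,
      List.singleton_append, Nat.add_zero]
    congr 1
    congr 1
    apply List.map_congr_left
    intro i _
    congr 2
    omega

theorem length_flatten_replicate {α : Type} (n : Nat) (l : List α) :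
    ((List.replicate n l).flatten).length = n * l.length := by
  induction n with
  | zero => simp
  | succ k ih => simp [List.replicate_succ, ih]; ring

theorem getD_flatten_replicate {α : Type} (d : α) (l : List α) (hl : l ≠ []) :
    ∀ (n i : Nat), i < n * l.length →
      ((List.replicate n l).flatten).getD i d = l.getD (i % l.length) d := by
  intro n
  induction n with
  | zero => intro i h; simp at h
  | succ k ih =>
    intro i h
    have hL : 0 < l.length := List.length_pos_iff.mpr hl
    have hexp : (k + 1) * l.length = k * l.length + l.length := by ring
    rw [List.replicate_succ, List.flatten_cons]
    by_cases hi : i < l.length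
    · rw [List.getD_append _ _ _ _ hi, Nat.mod_eq_of_lt hi]
    · replace hi := Nat.le_of_not_lt hi
      rw [List.getD_append_right _ _ _ _ hi, ih (i - l.length) (by omega)]
      congr 1
      exact (Nat.mod_eq_sub_mod hi).symm

theorem main_eq (models : List (Option String)) (count : Int) (hm : models ≠ [])
    (hpos : 0 < count) :
    expand_models_py models count = expand_models_py_alt models count := by
  have hL : 0 < models.length := List.length_pos_iff.mpr hm
  have hLc : (0 : Int) < (models.length : Int) := by exact_mod_cast hL
  have hcount : count = ((count.toNat : Nat) : Int) := by omega
  have hfd : PySem.Int.floordiv count (models.length : Int) = count / (models.length : Int) :=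
    PySem.Int.floordiv_eq_ediv_of_pos hLc
  have hreps : (PySem.Int.floordiv count (models.length : Int) + 1).toNat
      = count.toNat / models.length + 1 := by
    obtain ⟨n, rfl⟩ : ∃ m : Nat, count = (m : Int) := ⟨count.toNat, by omega⟩
    rw [hfd]
    simp only [Int.toNat_natCast]
    rw [← Int.natCast_div]
    generalize n / models.length = q
    omega
  have hlenF : ((List.replicate ((PySem.Int.floordiv count (models.length : Int) + 1).toNat) models).flatten).length
      = (count.toNat / models.length + 1) * models.length := by
    rw [hreps, length_flatten_replicate]
  have hcov : count.toNat ≤ (count.toNat / models.length + 1) * models.length := by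
    have h1 := Nat.div_add_mod count.toNat models.length
    have h2 := Nat.mod_lt count.toNat hL
    nlinarith
  have hcF : count.toNat ≤ ((List.replicate ((PySem.Int.floordiv count (models.length : Int) + 1).toNat) models).flatten).length := by
    rw [hlenF]; exact hcov
  have hget : ∀ (i : Nat), i < ((List.replicate ((PySem.Int.floordiv count (models.length : Int) + 1).toNat) models).flatten).length →
      ∀ (hi : i < ((List.replicate ((PySem.Int.floordiv count (models.length : Int) + 1).toNat) models).flatten).length),
      ((List.replicate ((PySem.Int.floordiv count (models.length : Int) + 1).toNat) models).flatten)[i]'hi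
        = models.getD (i % models.length) none := by
    intro i h hi
    rw [← List.getD_eq_getElem _ none hi]
    exact getD_flatten_replicate none models hm _ i (by rwa [length_flatten_replicate] at h)
  have hB : expand_models_py_alt models count
      = ((List.replicate ((PySem.Int.floordiv count (models.length : Int) + 1).toNat) models).flatten).take count.toNat := by
    unfold expand_models_py_alt
    rw [if_neg (by omega), if_neg hm]
  rw [hB]
  unfold expand_models_py
  rw [if_neg (by omega), if_neg hm]
  by_cases hle : count ≤ (models.length : Int)
  · rw [if_pos hle]
    have hcle : count.toNat ≤ models.length := by omega
    apply List.ext_getElem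
    · simp only [List.length_take]
      omega
    · intro i h1 h2
      have hic : i < count.toNat := by simp only [List.length_take] at h1; omega
      have hiF : i < ((List.replicate ((PySem.Int.floordiv count (models.length : Int) + 1).toNat) models).flatten).length := by omega
      have hiL : i < models.length := by omega
      simp only [List.getElem_take]
      rw [hget i hiF hiF, List.getD_eq_getElem _ none (Nat.mod_lt _ hL)]
      congr 1
      exact (Nat.mod_eq_of_lt hiL).symm
  · rw [if_neg hle]
    rw [expandLoopA_eq]
    apply List.ext_getElem
    · simp only [List.nil_append, List.length_map, List.length_range, List.length_take]
      omega
    · intro i h1 h2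
      have hic : i < count.toNat := by
        simp only [List.nil_append, List.length_map, List.length_range] at h1; exact h1
      have hiF : i < ((List.replicate ((PySem.Int.floordiv count (models.length : Int) + 1).toNat) models).flatten).length := by omega
      simp only [List.nil_append, List.getElem_map, List.getElem_range, List.getElem_take, Nat.zero_add]
      rw [hget i hiF hiF]

-- ===== VERDICT (by name: the statement is the Claim_ definition above) =====
theorem expand_models_py_spec : Claim_equal_expand_models_py := by
  intro models count _
  unfold Spec_expand_models_py
  by_cases h0 : count ≤ 0
  · unfold expand_models_py expand_models_py_alt
    rw [if_pos h0, if_pos h0]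
  · by_cases hm : models = []
    · unfold expand_models_py expand_models_py_alt
      rw [if_neg h0, if_neg h0, if_pos hm, if_pos hm]
    · exact main_eq models count hm (by omega)
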